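-- pv_equiv track=rewrite | github.com/harshstava/PlasmoFP_public | src/co_occurance/calculate_mask_and_compare_imputation_with_uncertainty.py | filter_to_deepest_terms
-- ===== SOURCE A (Python) =====
-- from typing import Dict, List, Set, Tuple
--
-- def filter_to_deepest_terms(go_terms: List[str], ancestors_dict: Dict[str, List[str]]) -> List[str]:
--     """Filter GO terms to keep only the deepest (most specific) terms."""
--     if not go_terms:
--         return []
--
--     deepest_terms = []
--     for term in go_terms:
--         is_deepest = True
--         term_ancestors = set(ancestors_dict.get(term, []))
--         for other_term in go_terms:
--             if other_term != term:
--                 other_ancestors = set(ancestors_dict.get(other_term, []))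
--                 if term in other_ancestors:
--                     is_deepest = False
--                     break
--         if is_deepest:
--             deepest_terms.append(term)
--     return deepest_terms
-- ===== SOURCE B (Python) =====
-- def filter_to_deepest_terms(go_terms, ancestors_dict):
--     """Filter GO terms to keep only the deepest (most specific) terms."""
--     dominated = set()
--     for term in go_terms:
--         for anc in ancestors_dict.get(term, []):
--             if anc != term:
--                 dominated.add(anc)
--     return [t for t in go_terms if t not in dominated]
-- ===== Notes on version B (the rewrite author's own statement) =====
-- stated objective: faster
-- what changed: Replaces the quadratic all-pairs scan (for each term, re-scan all other terms and rebuild their ancestor sets) with one pass that collects every ancestor (other than the owning term itself) into a single 'dominated' set, then keeps the terms not in it.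
import Mathlib
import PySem

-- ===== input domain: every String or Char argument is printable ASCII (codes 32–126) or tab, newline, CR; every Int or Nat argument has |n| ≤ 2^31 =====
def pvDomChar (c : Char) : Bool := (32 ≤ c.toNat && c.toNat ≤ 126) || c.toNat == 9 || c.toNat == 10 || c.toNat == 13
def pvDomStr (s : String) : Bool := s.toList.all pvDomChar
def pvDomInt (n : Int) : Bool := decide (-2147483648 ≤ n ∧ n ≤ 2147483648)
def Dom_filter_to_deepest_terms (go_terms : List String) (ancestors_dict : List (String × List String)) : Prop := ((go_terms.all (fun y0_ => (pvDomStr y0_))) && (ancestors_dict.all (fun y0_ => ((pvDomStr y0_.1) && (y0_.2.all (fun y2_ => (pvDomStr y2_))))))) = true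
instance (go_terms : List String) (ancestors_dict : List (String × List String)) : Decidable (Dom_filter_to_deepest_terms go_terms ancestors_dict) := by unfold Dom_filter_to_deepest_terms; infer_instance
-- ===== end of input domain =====

-- B replaces A's quadratic all-pairs scan by one pass building a single set of dominated
-- (ancestor-of-another-term) strings, then a membership filter; same return value.

-- ===== PORT A =====
-- inner 'for other_term in go_terms: … break' loop of A: returns is_deepest
def pvLoopA (ancestors_dict : List (String × List String)) (tm : String) : List String → Bool
  | [] => true
  | other :: rest =>
    if other ≠ tm then
      if tm ∈ PySem.Set.ofList ((PySem.Dict.mk ancestors_dict).getD other []) then false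
      else pvLoopA ancestors_dict tm rest
    else pvLoopA ancestors_dict tm rest

def filter_to_deepest_terms (go_terms : List String) (ancestors_dict : List (String × List String)) : List String :=
  if go_terms = [] then []
  else
    go_terms.foldl (fun deepest_terms tm =>
      let _term_ancestors := PySem.Set.ofList ((PySem.Dict.mk ancestors_dict).getD tm [])
      if pvLoopA ancestors_dict tm go_terms then deepest_terms ++ [tm] else deepest_terms) []

-- ===== PORT B =====
def filter_to_deepest_terms_alt (go_terms : List String) (ancestors_dict : List (String × List String)) : List String :=
  let dominated : PySem.Set String :=
    go_terms.foldl (fun s tm =>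
      ((PySem.Dict.mk ancestors_dict).getD tm []).foldl
        (fun s anc => if anc ≠ tm then PySem.Set.add s anc else s) s)
      PySem.Set.empty
  go_terms.filter (fun t => decide (t ∉ dominated))

-- ===== PRECONDITION & SPEC =====
def Spec_filter_to_deepest_terms (go_terms : List String) (ancestors_dict : List (String × List String)) (out : List String) : Prop := out = filter_to_deepest_terms_alt go_terms ancestors_dict
instance (go_terms : List String) (ancestors_dict : List (String × List String)) (out : List String) : Decidable (Spec_filter_to_deepest_terms go_terms ancestors_dict out) := by unfold Spec_filter_to_deepest_terms; infer_instance

-- ===== CLAIM (what is proved, stated in full; the proofs are below) =====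
def Claim_equal_filter_to_deepest_terms : Prop := ∀ (go_terms : List String) (ancestors_dict : List (String × List String)), Dom_filter_to_deepest_terms go_terms ancestors_dict → Spec_filter_to_deepest_terms go_terms ancestors_dict (filter_to_deepest_terms go_terms ancestors_dict)

-- ===== LEMMAS AND PROOFS =====

-- A's inner loop succeeds iff tm is nobody else's ancestor.
theorem pvLoopA_eq_true_iff (ad : List (String × List String)) (tm : String) (xs : List String) :
    pvLoopA ad tm xs = true ↔ ∀ other ∈ xs, other ≠ tm → tm ∉ (PySem.Dict.mk ad).getD other [] := by
  induction xs with
  | nil => simp [pvLoopA]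
  | cons other rest ih =>
    by_cases h : other = tm
    · simp [pvLoopA, h, ih]
    · by_cases hm : tm ∈ (PySem.Dict.mk ad).getD other []
      · simp [pvLoopA, h, PySem.Set.mem_ofList, hm]
      · simp [pvLoopA, h, PySem.Set.mem_ofList, hm, ih]

-- membership in the inner fold of B (one term's ancestors added, skipping the term itself)
theorem mem_inner_fold (tm : String) (l : List String) (s : PySem.Set String) (a : String) :
    a ∈ l.foldl (fun s anc => if anc ≠ tm then PySem.Set.add s anc else s) s ↔
      a ∈ s ∨ (a ∈ l ∧ a ≠ tm) := by
  induction l generalizing s with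
  | nil => simp
  | cons x xs ih =>
    simp only [List.foldl_cons]
    by_cases h : x = tm
    · simp only [ne_eq, h, not_true_eq_false, if_false, ih, List.mem_cons]
      constructor
      · rintro (hs | ⟨hx, hne⟩)
        · exact Or.inl hs
        · exact Or.inr ⟨Or.inr hx, hne⟩
      · rintro (hs | ⟨hx | hx, hne⟩)
        · exact Or.inl hs
        · exact absurd hx hne
        · exact Or.inr ⟨hx, hne⟩
    · simp only [ne_eq, h, not_false_eq_true, if_true, ih, PySem.Set.mem_add, List.mem_cons]
      constructor
      · rintro (⟨hs | hxa⟩ | ⟨hx, hne⟩)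
        · exact Or.inl hs
        · exact Or.inr ⟨Or.inl hxa, fun he => h (hxa ▸ he)⟩
        · exact Or.inr ⟨Or.inr hx, hne⟩
      · rintro (hs | ⟨hx | hx, hne⟩)
        · exact Or.inl (Or.inl hs)
        · exact Or.inl (Or.inr hx)
        · exact Or.inr ⟨hx, hne⟩

-- membership in B's dominated set
theorem mem_dominated (go_terms : List String) (ad : List (String × List String))
    (s : PySem.Set String) (a : String) :
    a ∈ go_terms.foldl (fun s tm =>
        ((PySem.Dict.mk ad).getD tm []).foldl
          (fun s anc => if anc ≠ tm then PySem.Set.add s anc else s) s) s ↔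
      a ∈ s ∨ ∃ tm ∈ go_terms, a ∈ (PySem.Dict.mk ad).getD tm [] ∧ a ≠ tm := by
  induction go_terms generalizing s with
  | nil => simp
  | cons x xs ih =>
    rw [List.foldl_cons, ih, mem_inner_fold]
    simp only [List.mem_cons, exists_eq_or_imp]
    tauto

-- ===== VERDICT (by name: the statement is the Claim_ definition above) =====
theorem filter_to_deepest_terms_spec : Claim_equal_filter_to_deepest_terms := by
  intro go_terms ad _
  unfold Spec_filter_to_deepest_terms filter_to_deepest_terms filter_to_deepest_terms_alt
  rw [PySem.List.foldl_append_if_eq_filter]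
  by_cases hnil : go_terms = []
  · simp [hnil]
  · simp only [hnil, if_false, List.nil_append]
    apply List.filter_congr
    intro t _
    rw [Bool.eq_iff_iff, pvLoopA_eq_true_iff, decide_eq_true_iff, mem_dominated]
    simp only [PySem.Set.empty, List.not_mem_nil, false_or, not_exists, not_and]
    constructor
    · intro h tm hmem hin; by_contra hne; exact h tm hmem (fun he => hne he.symm) hin
    · intro h other hmem hne hin
      have := h other hmem hin
      simp only [ne_eq, not_not] at this
      exact hne this.symm
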